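-- pv_equiv track=rewrite | github.com/tobywenman/AdventOfCode23 | d12/main.py | check
-- ===== SOURCE A (Python) =====
-- def check(string, values):
--     value = 0
--     count = 0
--     for i in string:
--         if i == '#':
--             count += 1
--         elif count != 0:
--             if value == len(values):
--                 return False
--             elif values[value] != count:
--                 return False
--             else:
--                 count = 0
--                 value += 1
--     if count != 0:
--         if value == len(values):
--             return False
--         elif values[value] != count:
--             return False
--         else:
--             value += 1
--
--     return value == len(values)
-- ===== SOURCE B (Python) =====
-- def check(string, values):
--     normalized = ''.join(c if c == '#' else ' ' for c in string)
--     return [len(run) for run in normalized.split()] == list(values)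
-- ===== Notes on version B (the rewrite author's own statement) =====
-- stated objective: idiomatic
-- what changed: A validates '#'-run lengths in a streaming loop that tracks an index into values and early-returns on the first mismatch; B materializes the full list of run lengths (normalize non-'#' chars to spaces, str.split, map len) and compares it to values in one step.
import Mathlib
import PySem

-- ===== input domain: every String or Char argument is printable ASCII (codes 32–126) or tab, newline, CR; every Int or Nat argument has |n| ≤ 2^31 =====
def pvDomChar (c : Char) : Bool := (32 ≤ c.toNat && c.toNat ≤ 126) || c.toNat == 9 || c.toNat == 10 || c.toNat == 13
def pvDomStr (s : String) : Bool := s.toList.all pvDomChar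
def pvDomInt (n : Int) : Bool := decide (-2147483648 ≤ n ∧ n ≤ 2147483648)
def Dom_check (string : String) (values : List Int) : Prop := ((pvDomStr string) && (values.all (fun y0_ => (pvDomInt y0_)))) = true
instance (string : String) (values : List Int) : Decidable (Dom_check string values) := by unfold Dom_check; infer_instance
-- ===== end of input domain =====

-- B replaces A's streaming index-and-early-exit validation with a normalize/split/compare
-- decomposition (idiomatic; return value only, no side effects in either version).

-- ===== PORT A =====
-- The loop over the string with early returns; (value, count) is the loop state.
-- values[value] is read only after 'value == len(values)' was ruled out and value ≤ len(values)
-- holds throughout, so the index is provably in range and pyGetD is exact; A never raises.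
def checkGo (values : List Int) : List Char → Int → Int → Bool
  | [], value, count =>
      if count ≠ 0 then
        if value = (values.length : Int) then false
        else if PySem.List.pyGetD values value 0 ≠ count then false
        else decide ((value + 1) = (values.length : Int))
      else decide (value = (values.length : Int))
  | c :: rest, value, count =>
      if c = '#' then checkGo values rest value (count + 1)
      else if count ≠ 0 then
        if value = (values.length : Int) then false
        else if PySem.List.pyGetD values value 0 ≠ count then false
        else checkGo values rest (value + 1) 0
      else checkGo values rest value count

def check (string : String) (values : List Int) : Bool :=
  checkGo values string.toList 0 0

-- ===== PORT B =====
def check_alt (string : String) (values : List Int) : Bool :=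
  let normalized : List Char := string.toList.map (fun c => if c = '#' then c else ' ')
  decide ((PySem.Chars.split₀ normalized).map (fun run => (run.length : Int)) = values)

-- ===== PRECONDITION & SPEC =====
def Spec_check (string : String) (values : List Int) (out : Bool) : Prop := out = check_alt string values
instance (string : String) (values : List Int) (out : Bool) : Decidable (Spec_check string values out) := by unfold Spec_check; infer_instance

-- ===== CLAIM (what is proved, stated in full; the proofs are below) =====
def Claim_equal_check : Prop := ∀ (string : String) (values : List Int), Dom_check string values → Spec_check string values (check string values)

-- ===== LEMMAS AND PROOFS =====

-- the list of '#'-run lengths of cs, with a pending run of length `count` already seen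
def runsI : List Char → Int → List Int
  | [], count => if count ≠ 0 then [count] else []
  | c :: rest, count =>
      if c = '#' then runsI rest (count + 1)
      else if count ≠ 0 then count :: runsI rest 0
      else runsI rest 0

theorem checkGo_eq (values : List Int) (cs : List Char) :
    ∀ (v : Nat), v ≤ values.length → ∀ (count : Int),
      checkGo values cs (v : Int) count = decide (values.drop v = runsI cs count) := by
  induction cs with
  | nil =>
      intro v hv count
      simp only [checkGo, runsI]
      by_cases hcnt : count = 0
      · simp only [hcnt, ne_eq, not_true_eq_false, if_false]
        rcases Nat.lt_or_ge v values.length with hlt | hge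
        · have h1 : values.drop v ≠ [] := by
            simp [List.drop_eq_nil_iff]; omega
          have h2 : ((v : Int) ≠ (values.length : Int)) := by
            exact_mod_cast Nat.ne_of_lt hlt
          simp [h1, h2]
        · have hveq : v = values.length := le_antisymm hv hge
          simp [hveq]
      · simp only [ne_eq, hcnt, not_false_eq_true, if_true]
        by_cases hvl : (v : Int) = (values.length : Int)
        · have hveq : v = values.length := by exact_mod_cast hvl
          simp [hvl, List.drop_eq_nil_of_le (le_of_eq hveq.symm)]
        · have hlt : v < values.length := lt_of_le_of_ne hv (by exact_mod_cast hvl)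
          rw [List.drop_eq_getElem_cons hlt, PySem.List.pyGetD_natCast,
            List.getD_eq_getElem values 0 hlt]
          by_cases hval : values[v] = count
          · have hdec : ((v : Int) + 1 = (values.length : Int)) ↔ values.drop (v+1) = [] := by
              rw [List.drop_eq_nil_iff]; omega
            simp [hvl, hval, hdec]
          · rw [if_neg hvl, if_pos (by simp [hval])]
            symm
            rw [decide_eq_false_iff_not]
            intro h
            exact hval (List.cons_eq_cons.mp h).1
  | cons c rest ih =>
      intro v hv count
      by_cases hc : c = '#'
      · subst hc
        simp only [checkGo, runsI]
        exact ih v hv (count + 1)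
      · simp only [checkGo, runsI, if_neg hc]
        by_cases hcnt : count = 0
        · simp only [hcnt, ne_eq, not_true_eq_false, if_false]
          exact ih v hv 0
        · simp only [ne_eq, hcnt, not_false_eq_true, if_true]
          by_cases hvl : (v : Int) = (values.length : Int)
          · have hveq : v = values.length := by exact_mod_cast hvl
            simp [hvl, List.drop_eq_nil_of_le (le_of_eq hveq.symm)]
          · have hlt : v < values.length := lt_of_le_of_ne hv (by exact_mod_cast hvl)
            rw [List.drop_eq_getElem_cons hlt, PySem.List.pyGetD_natCast,
              List.getD_eq_getElem values 0 hlt]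
            by_cases hval : values[v] = count
            · have h1 : ((v : Int) + 1) = (((v + 1 : Nat)) : Int) := by push_cast; ring
              rw [if_neg hvl, if_neg (by simp [hval]), h1, ih (v+1) hlt 0]
              simp [hval]
            · rw [if_neg hvl, if_pos (by simp [hval])]
              symm
              rw [decide_eq_false_iff_not]
              intro h
              exact hval (List.cons_eq_cons.mp h).1

theorem split₀_go_lengths (cs : List Char) :
    ∀ (cur : List Char) (acc : List (List Char)),
      (PySem.Chars.split₀.go (cs.map (fun c => if c = '#' then c else ' ')) cur acc).map
          (fun run => (run.length : Int))
        = acc.reverse.map (fun run => (run.length : Int)) ++ runsI cs (cur.length : Int) := by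
  induction cs with
  | nil =>
      intro cur acc
      simp only [List.map_nil, PySem.Chars.split₀.go, runsI]
      by_cases hc : cur = []
      · simp [hc]
      · have hlen : ((cur.length : Int) ≠ 0) := by
          simpa using fun h => hc (List.length_eq_zero_iff.mp h)
        simp [List.isEmpty_iff, hc]
  | cons c rest ih =>
      intro cur acc
      by_cases hc : c = '#'
      · subst hc
        have hmap : (('#' : Char) :: rest).map (fun c => if c = '#' then c else ' ')
            = '#' :: rest.map (fun c => if c = '#' then c else ' ') := by simp
        rw [hmap, PySem.Chars.split₀.go,
          show PySem.Chars.isspace '#' = false from by decide]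
        simp only [Bool.false_eq_true, if_false, ih]
        simp [runsI]
      · have hmap : (c :: rest).map (fun c => if c = '#' then c else ' ')
            = ' ' :: rest.map (fun c => if c = '#' then c else ' ') := by simp [hc]
        rw [hmap, PySem.Chars.split₀.go,
          show PySem.Chars.isspace ' ' = true from by decide]
        simp only [if_true]
        by_cases hcur : cur = []
        · subst hcur
          simp only [List.isEmpty_nil, if_true, ih]
          simp [runsI, hc]
        · have hne : cur.isEmpty = false := by simp [hcur]
          have hlen : ((cur.length : Int) ≠ 0) := by
            simpa using fun h => hcur (List.length_eq_zero_iff.mp h)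
          rw [hne]
          simp only [Bool.false_eq_true, if_false, ih]
          simp [runsI, hc, hcur]

-- ===== VERDICT (by name: the statement is the Claim_ definition above) =====
theorem check_spec : Claim_equal_check := by
  intro s values _
  unfold Spec_check check check_alt
  have hA := checkGo_eq values s.toList 0 (Nat.zero_le _) 0
  have hB := split₀_go_lengths s.toList [] []
  simp [PySem.Chars.split₀] at hB ⊢
  rw [show ((0:Nat):Int) = 0 from rfl] at hA
  rw [hA]
  simp only [hB, List.drop_zero]
  simp [eq_comm]
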